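-- pv_equiv track=rewrite | github.com/kumar-atul-au13/WoodpeckerTA_Codes | Week7/Day4/CC/All_posible_bst.py | all_possible_bst
-- ===== SOURCE A (Python) =====
-- def all_possible_bst(start,end):
--     if start>end:
--         return [[]]
--     ans=[]
--     for root in range(start,end+1):#root-2
--         larr=all_possible_bst(start,root-1)#-- 3
--         rarr=all_possible_bst(root+1,end)#-- 4
--         for lcomb in larr:
--             lcomb.insert(0,root)
--             for rcomb in rarr:
--                 ans.extend([lcomb+rcomb])# lcomb and rcomb are arrays
--     return ans
-- ===== SOURCE B (Python) =====
-- def all_possible_bst(start, end):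
--     # Bottom-up DP on interval length: dp[k] holds all flattened BSTs over the
--     # relative keys 0..k-1; the final answer is dp[n] shifted by `start`.
--     if start > end:
--         return [[]]
--     n = end - start + 1
--     dp = [[[]]]
--     for _ in range(n):
--         cur = [[root] + l + [root + 1 + x for x in r]
--                for root, (dl, dr) in enumerate(zip(dp, reversed(dp)))
--                for l in dl
--                for r in dr]
--         dp.append(cur)
--     return [[start + x for x in t] for t in dp[n]]
-- ===== Notes on version B (the rewrite author's own statement) =====
-- stated objective: alternative
-- what changed: Replaced the memoization-free top-down recursion with a bottom-up DP over interval length: tree shapes over 0..k-1 are computed once per length and the final table entry is shifted by `start`, instead of re-solving every (start,end) subinterval recursively; the output size dominates the cost, so this is not measurably faster.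
import Mathlib
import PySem

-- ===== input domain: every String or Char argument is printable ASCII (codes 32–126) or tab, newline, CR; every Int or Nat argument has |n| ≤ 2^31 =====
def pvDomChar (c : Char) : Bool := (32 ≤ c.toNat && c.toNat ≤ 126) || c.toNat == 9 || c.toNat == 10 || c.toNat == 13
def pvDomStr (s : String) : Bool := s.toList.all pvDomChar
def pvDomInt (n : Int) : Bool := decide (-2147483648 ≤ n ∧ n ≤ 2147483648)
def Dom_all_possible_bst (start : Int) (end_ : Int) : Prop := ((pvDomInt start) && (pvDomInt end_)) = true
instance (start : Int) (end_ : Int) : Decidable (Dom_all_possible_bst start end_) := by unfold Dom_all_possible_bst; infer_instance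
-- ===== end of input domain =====

-- B replaces A's memoization-free recursion by a bottom-up DP over interval length
-- (shapes over 0..k-1 computed once, shifted by `start` at the end); same return value.

-- ===== PORT A =====
-- Note: Python A's `lcomb.insert(0, root)` mutates a list freshly returned by the
-- recursive call, so its only observable effect is the prefix `root :: lcomb` used below.
def all_possible_bst (start : Int) (end_ : Int) : List (List Int) :=
  if start > end_ then [[]]
  else
    (PySem.List.pyRange start (end_ + 1) 1).attach.foldl (fun ans root =>
      let larr := all_possible_bst start (root.1 - 1)
      let rarr := all_possible_bst (root.1 + 1) end_
      larr.foldl (fun ans lcomb =>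
        rarr.foldl (fun ans rcomb => ans ++ [(root.1 :: lcomb) ++ rcomb]) ans) ans) []
termination_by (end_ + 1 - start).toNat
decreasing_by
  · have h := PySem.List.mem_pyRange_one.mp root.2; omega
  · have h := PySem.List.mem_pyRange_one.mp root.2; omega

-- ===== PORT B =====
-- the list comprehension building `cur` from the current table `dp`
def bstCur (dp : List (List (List Int))) : List (List Int) :=
  (PySem.List.enumerate (dp.zip dp.reverse) 0).flatMap (fun p =>
    p.2.1.flatMap (fun l => p.2.2.map (fun r => p.1 :: l ++ r.map (fun x => p.1 + 1 + x))))

def all_possible_bst_alt (start : Int) (end_ : Int) : List (List Int) :=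
  if start > end_ then [[]]
  else
    let n := end_ - start + 1
    let dp := (PySem.List.pyRange 0 n 1).foldl (fun dp _ => dp ++ [bstCur dp]) [[[]]]
    (PySem.List.pyGetD dp n []).map (fun t => t.map (fun x => start + x))

-- ===== PRECONDITION & SPEC =====
-- A's recursion depth equals the interval length, so on intervals longer than
-- Python's recursion limit allows (measured: end - start + 1 >= 997) the Python A
-- raises RecursionError instead of returning; Pre_ excludes exactly those inputs.
def Pre_all_possible_bst (start : Int) (end_ : Int) : Prop := end_ - start ≤ 995
instance (start : Int) (end_ : Int) : Decidable (Pre_all_possible_bst start end_) := by unfold Pre_all_possible_bst; infer_instance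
def pvWitness_all_possible_bst : Int × Int := (1, 3)

def Spec_all_possible_bst (start : Int) (end_ : Int) (out : List (List Int)) : Prop := out = all_possible_bst_alt start end_
instance (start : Int) (end_ : Int) (out : List (List Int)) : Decidable (Spec_all_possible_bst start end_ out) := by unfold Spec_all_possible_bst; infer_instance

-- ===== CLAIM (what is proved, stated in full; the proofs are below) =====
def Claim_equal_all_possible_bst : Prop := ∀ (start : Int) (end_ : Int), Dom_all_possible_bst start end_ → Pre_all_possible_bst start end_ → Spec_all_possible_bst start end_ (all_possible_bst start end_)

-- ===== LEMMAS AND PROOFS =====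

-- A's value for an empty interval
theorem A_empty (start end_ : Int) (h : start > end_) : all_possible_bst start end_ = [[]] := by
  rw [all_possible_bst]; simp [h]

-- A's two inner loops as a flatMap
theorem inner_loops (root : Int) (rarr : List (List Int)) :
    ∀ (larr ans : List (List Int)),
      larr.foldl (fun ans lcomb =>
          rarr.foldl (fun ans rcomb => ans ++ [(root :: lcomb) ++ rcomb]) ans) ans
        = ans ++ larr.flatMap (fun l => rarr.map (fun r => (root :: l) ++ r))
  | [], ans => by simp
  | l :: ls, ans => by
    rw [List.foldl_cons, inner_loops root rarr ls,
      PySem.List.foldl_append_singleton_eq_map]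
    simp

-- A's loop as a flatMap (inner foldl-append loops flattened)
theorem A_flat (start end_ : Int) (h : start ≤ end_) :
    all_possible_bst start end_ =
      (PySem.List.pyRange start (end_ + 1) 1).flatMap (fun root =>
        (all_possible_bst start (root - 1)).flatMap (fun l =>
          (all_possible_bst (root + 1) end_).map (fun r => (root :: l) ++ r))) := by
  rw [all_possible_bst, if_neg (by omega)]
  simp only [inner_loops]
  rw [List.foldl_attach (f := fun (ans : List (List Int)) (root : Int) =>
    ans ++ (all_possible_bst start (root - 1)).flatMap (fun l =>
      (all_possible_bst (root + 1) end_).map (fun r => (root :: l) ++ r)))]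
  rw [PySem.List.foldl_append_eq_flatMap]
  simp

-- the shape table entry: A on the relative interval 0..k-1
def S (k : Nat) : List (List Int) := all_possible_bst 0 ((k : Int) - 1)

-- shift lemma: A on any interval is the shifted relative-interval result
theorem A_shift (k : Nat) : ∀ (s e : Int), (e - s + 1).toNat = k →
    all_possible_bst s e = (all_possible_bst 0 (e - s)).map (List.map (fun x => s + x)) := by
  induction k using Nat.strong_induction_on with
  | _ k ih =>
    intro s e hk
    by_cases h : s > e
    · rw [A_empty _ _ h, A_empty 0 (e - s) (by omega)]; simp
    · have hse : s ≤ e := le_of_not_gt h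
      rw [A_flat s e hse, A_flat 0 (e - s) (by omega)]
      have hr1 : PySem.List.pyRange s (e + 1) 1
          = (List.range k).map (fun j : Nat => s + (j : Int)) := by
        rw [PySem.List.pyRange_one]
        have h2 : (e + 1 - s).toNat = k := by omega
        rw [h2]
      have hr2 : PySem.List.pyRange 0 (e - s + 1) 1
          = (List.range k).map (fun j : Nat => 0 + (j : Int)) := by
        rw [PySem.List.pyRange_one]
        have h2 : (e - s + 1 - 0).toNat = k := by omega
        rw [h2]
      rw [hr1, hr2]
      simp only [List.flatMap_map, List.map_flatMap]
      apply List.flatMap_congr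
      intro j hj
      have hjk : j < k := List.mem_range.mp hj
      have e1 : all_possible_bst s (s + (j : Int) - 1)
          = (all_possible_bst 0 ((j : Int) - 1)).map (List.map (fun x => s + x)) := by
        have := ih j hjk s (s + (j : Int) - 1) (by omega)
        have harg : s + (j : Int) - 1 - s = (j : Int) - 1 := by ring
        rw [harg] at this
        exact this
      have e2 : all_possible_bst (s + (j : Int) + 1) e
          = (all_possible_bst 0 (e - s - (j : Int) - 1)).map
              (List.map (fun x => s + (j : Int) + 1 + x)) := by
        have := ih (k - 1 - j) (by omega) (s + (j : Int) + 1) e (by omega)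
        have harg : e - (s + (j : Int) + 1) = e - s - (j : Int) - 1 := by ring
        rw [harg] at this
        exact this
      have e3 : all_possible_bst (0 + (j : Int) + 1) (e - s)
          = (all_possible_bst 0 (e - s - (j : Int) - 1)).map
              (List.map (fun x => (j : Int) + 1 + x)) := by
        have := ih (k - 1 - j) (by omega) (0 + (j : Int) + 1) (e - s) (by omega)
        have harg : e - s - (0 + (j : Int) + 1) = e - s - (j : Int) - 1 := by ring
        rw [harg] at this
        simpa using this
      rw [e1, e2, e3]
      simp only [zero_add, List.flatMap_map, List.map_map, Function.comp_def,
        List.map_cons, List.map_append]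
      apply List.flatMap_congr
      intro l _
      simp [add_assoc]

-- the comprehension step produces the next shape list
theorem bstCur_S (k : Nat) :
    bstCur ((List.range (k + 1)).map S) = S (k + 1) := by
  have hz : (((List.range (k + 1)).map S).zip (((List.range (k + 1)).map S).reverse))
      = (List.range (k + 1)).map (fun i => (S i, S (k - i))) := by
    apply List.ext_getElem
    · simp
    · intro i h1 h2
      simp only [List.getElem_zip, List.getElem_reverse, List.getElem_map,
        List.getElem_range, List.length_map, List.length_range]
      have hi : i < k + 1 := by simpa using h2
      have hsub : k + 1 - 1 - i = k - i := by omega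
      rw [hsub]
  have he : PySem.List.enumerate ((List.range (k + 1)).map (fun i => (S i, S (k - i)))) 0
      = (List.range (k + 1)).map (fun i : Nat => ((i : Int), (S i, S (k - i)))) := by
    apply List.ext_getElem
    · simp [PySem.List.length_enumerate]
    · intro i h1 h2
      simp [PySem.List.getElem_enumerate]
  rw [bstCur, hz, he]
  have hS : S (k + 1) = all_possible_bst 0 (k : Int) := by
    rw [S]; congr 1; push_cast; ring
  rw [hS, A_flat 0 (k : Int) (by positivity), PySem.List.pyRange_one]
  have hT : ((k : Int) + 1 - 0).toNat = k + 1 := by omega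
  rw [hT]
  simp only [List.flatMap_map]
  apply List.flatMap_congr
  intro i hi
  have hik : i ≤ k := by have := List.mem_range.mp hi; omega
  have hA1 : all_possible_bst 0 (0 + (i : Int) - 1) = S i := by
    rw [S]; congr 1; ring
  have hA2 : all_possible_bst (0 + (i : Int) + 1) (k : Int)
      = (S (k - i)).map (List.map (fun x => (i : Int) + 1 + x)) := by
    have h := A_shift (k - i) ((i : Int) + 1) (k : Int) (by omega)
    have harg : (k : Int) - ((i : Int) + 1) = ((k - i : Nat) : Int) - 1 := by omega
    rw [harg] at h
    rw [show (0 + (i : Int) + 1) = (i : Int) + 1 by ring, h, S]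
  rw [hA1, hA2]
  simp [List.map_map, Function.comp_def]

-- table invariant
theorem dp_inv (k : Nat) :
    (PySem.List.pyRange 0 (k : Int) 1).foldl (fun dp _ => dp ++ [bstCur dp]) [[[]]]
      = (List.range (k + 1)).map S := by
  induction k with
  | zero =>
    have h0 : S 0 = [[]] := A_empty 0 (((0 : Nat) : Int) - 1) (by norm_num)
    simp [PySem.List.pyRange_one_eq_nil (le_refl (0 : Int)), h0]
  | succ k ih =>
    rw [show (((k + 1 : Nat)) : Int) = (k : Int) + 1 by push_cast; ring]
    rw [PySem.List.pyRange_one_succ_right (by positivity), List.foldl_append, ih]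
    simp only [List.foldl_cons, List.foldl_nil]
    rw [bstCur_S, List.range_succ (n := k + 1)]
    simp

-- ===== VERDICT (by name: the statement is the Claim_ definition above) =====
theorem all_possible_bst_spec : Claim_equal_all_possible_bst := by
  intro s e _ _
  simp only [Spec_all_possible_bst, all_possible_bst_alt]
  by_cases h : s > e
  · rw [if_pos h, A_empty _ _ h]
  · rw [if_neg h]
    have hse : s ≤ e := le_of_not_gt h
    have hN : e - s + 1 = (((e - s + 1).toNat : Nat) : Int) := by omega
    rw [hN, dp_inv]
    have hg : PySem.List.pyGetD
        ((List.range ((e - s + 1).toNat + 1)).map S) (((e - s + 1).toNat : Int)) []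
        = S (e - s + 1).toNat := by
      rw [PySem.List.pyGetD_natCast]
      simp
    rw [hg]
    have hS : all_possible_bst 0 (e - s) = S (e - s + 1).toNat := by
      rw [S]; congr 1; omega
    rw [A_shift (e - s + 1).toNat s e (by omega), hS]
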